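-- pv_equiv track=rewrite | github.com/navidofek-cmyk/kubernetes_docker_interaktivne | generator_webu.py | odstran_ulohy_z_kodu
-- ===== SOURCE A (Python) =====
-- def odstran_ulohy_z_kodu(kod: str) -> str:
--     radky = kod.splitlines()
--     vysledek = []
--     preskakuj = False
--     for radek in radky:
--         stripped = radek.strip()
--         if stripped.startswith("# TVOJE ULOA") or stripped.startswith("# TVOJE ULOHA"):
--             preskakuj = True
--         if not preskakuj:
--             vysledek.append(radek)
--     return "\n".join(vysledek).rstrip()
-- ===== SOURCE B (Python) =====
-- def odstran_ulohy_z_kodu(kod: str) -> str: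
--     # Single character-level scan: consumes kod char by char, tracking the
--     # current line; emits kept lines directly into the output buffer and
--     # stops at the first marker line. No splitlines/join/list-of-lines.
--     out = []
--     line = []
--     i = 0
--     n = len(kod)
--     stopped = False
--     while i < n:
--         c = kod[i]
--         if c == '\r' or c == '\n':
--             s = ''.join(line).strip()
--             if s.startswith("# TVOJE ULOA") or s.startswith("# TVOJE ULOHA"):
--                 stopped = True
--                 break
--             out.extend(line)
--             out.append('\n')
--             line = []
--             if c == '\r' and i + 1 < n and kod[i + 1] == '\n':
--                 i += 2
--             else:
--                 i += 1
--         else: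
--             line.append(c)
--             i += 1
--     if not stopped:
--         s = ''.join(line).strip()
--         if not (s.startswith("# TVOJE ULOA") or s.startswith("# TVOJE ULOHA")):
--             out.extend(line)
--     return ''.join(out).rstrip()
-- ===== Notes on version B (the rewrite author's own statement) =====
-- stated objective: alternative
-- what changed: Replaces the splitlines/strip-flag/append/join pipeline with a single character-level state machine that scans the string once, tracking the current line and emitting kept lines directly into the output buffer, stopping at the first marker line.
import Mathlib
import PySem

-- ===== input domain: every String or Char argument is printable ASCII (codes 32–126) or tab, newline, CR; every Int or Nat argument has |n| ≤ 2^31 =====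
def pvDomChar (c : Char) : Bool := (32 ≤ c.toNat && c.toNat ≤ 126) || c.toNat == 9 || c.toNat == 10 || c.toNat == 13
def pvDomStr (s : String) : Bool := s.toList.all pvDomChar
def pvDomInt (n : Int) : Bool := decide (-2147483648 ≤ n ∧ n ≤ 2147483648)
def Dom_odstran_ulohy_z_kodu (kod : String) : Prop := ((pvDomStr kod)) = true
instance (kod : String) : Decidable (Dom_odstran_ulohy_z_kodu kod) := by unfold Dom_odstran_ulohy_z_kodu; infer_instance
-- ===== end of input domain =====

-- B replaces A's splitlines/flag-loop/join pipeline by a single character-level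
-- state machine over the raw string (tracks the current line, emits kept lines
-- directly, stops at the first marker line); same return value.

-- ===== PORT A =====
def pvStepA (st : List String × Bool) (radek : String) : List String × Bool :=
  let stripped := PySem.Str.strip radek
  let preskakuj :=
    if PySem.Str.startswith stripped "# TVOJE ULOA" || PySem.Str.startswith stripped "# TVOJE ULOHA"
    then true else st.2
  if preskakuj then (st.1, preskakuj) else (st.1 ++ [radek], preskakuj)

def odstran_ulohy_z_kodu (kod : String) : String :=
  let radky := PySem.Str.splitlines kod
  let st := radky.foldl pvStepA ([], false)
  PySem.Str.rstrip (PySem.Str.join "\n" st.1)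

-- ===== PORT B =====
-- the marker test of Source B: ''.join(line).strip().startswith(...)
def pvMarkerC (line : List Char) : Bool :=
  PySem.Chars.startswith (PySem.Chars.strip line) "# TVOJE ULOA".toList ||
  PySem.Chars.startswith (PySem.Chars.strip line) "# TVOJE ULOHA".toList

-- Source B's while loop: s = remaining input, line = current line buffer, out = output buffer
def pvGo (s line out : List Char) : List Char :=
  match s with
  | [] => if pvMarkerC line then out else out ++ line
  | '\r' :: '\n' :: rest =>
      if pvMarkerC line then out else pvGo rest [] (out ++ line ++ ['\n'])
  | c :: rest =>
      if c = '\r' ∨ c = '\n' then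
        if pvMarkerC line then out else pvGo rest [] (out ++ line ++ ['\n'])
      else pvGo rest (line ++ [c]) out

def odstran_ulohy_z_kodu_alt (kod : String) : String :=
  PySem.Str.rstrip (String.ofList (pvGo kod.toList [] []))

-- ===== PRECONDITION & SPEC =====
def Spec_odstran_ulohy_z_kodu (kod : String) (out : String) : Prop := out = odstran_ulohy_z_kodu_alt kod
instance (kod : String) (out : String) : Decidable (Spec_odstran_ulohy_z_kodu kod out) := by unfold Spec_odstran_ulohy_z_kodu; infer_instance

-- ===== CLAIM (what is proved, stated in full; the proofs are below) =====
def Claim_equal_odstran_ulohy_z_kodu : Prop := ∀ (kod : String), Dom_odstran_ulohy_z_kodu kod → Spec_odstran_ulohy_z_kodu kod (odstran_ulohy_z_kodu kod)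

-- ===== LEMMAS AND PROOFS =====

-- the line-level marker test of A, at String level
def pvJeMarker (r : String) : Bool :=
  PySem.Str.startswith (PySem.Str.strip r) "# TVOJE ULOA" ||
  PySem.Str.startswith (PySem.Str.strip r) "# TVOJE ULOHA"

-- the break-character test splitlines uses
def pvIsB (c : Char) : Bool :=
  have n := c.toNat
  decide (n = 10) || decide (n = 13) || decide (n = 11) || decide (n = 12) ||
    decide (n = 28) || decide (n = 29) || decide (n = 30) || decide (n = 133) ||
    decide (n = 8232) || decide (n = 8233)

theorem splitlines_eq (s : List Char) :
    PySem.Chars.splitlines s = PySem.Chars.splitlines.go pvIsB s [] [] := rfl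

-- kept prefix of a line list, and its "\n"-join
def pvKept (ls : List (List Char)) : List (List Char) := ls.takeWhile (fun l => !pvMarkerC l)
def pvJ (ls : List (List Char)) : List Char := PySem.Chars.join ['\n'] (pvKept ls)

theorem char_eq_of_toNat {c d : Char} (h : c.toNat = d.toNat) : c = d :=
  Char.ext (UInt32.toNat_inj.mp h)

theorem dom_isB_false (c : Char) (hd : pvDomChar c = true) (h : ¬(c = '\r' ∨ c = '\n')) :
    pvIsB c = false := by
  have h10 : c.toNat ≠ 10 := fun hn => h (Or.inr (char_eq_of_toNat hn))
  have h13 : c.toNat ≠ 13 := fun hn => h (Or.inl (char_eq_of_toNat hn))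
  simp only [pvDomChar, Bool.or_eq_true, Bool.and_eq_true, decide_eq_true_eq, beq_iff_eq] at hd
  simp only [pvIsB, Bool.or_eq_false_iff, decide_eq_false_iff_not]
  omega

-- ---- A-side: the flag fold computes the takeWhile prefix ----
theorem pvStepA_eq (st : List String × Bool) (r : String) :
    pvStepA st r = if pvJeMarker r || st.2 then (st.1, true) else (st.1 ++ [r], false) := by
  unfold pvStepA pvJeMarker
  rcases st with ⟨a, b⟩
  cases b <;>
    cases hm : PySem.Str.startswith (PySem.Str.strip r) "# TVOJE ULOA" <;>
      cases hh : PySem.Str.startswith (PySem.Str.strip r) "# TVOJE ULOHA" <;>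
        simp at hm hh <;> simp [hm, hh]

theorem pvFoldA_true (l : List String) (acc : List String) :
    l.foldl pvStepA (acc, true) = (acc, true) := by
  induction l with
  | nil => rfl
  | cons r rs ih => simp [pvStepA_eq, ih]

theorem pvFoldA_false (l : List String) (acc : List String) :
    (l.foldl pvStepA (acc, false)).1 = acc ++ l.takeWhile (fun r => !pvJeMarker r) := by
  induction l generalizing acc with
  | nil => simp
  | cons r rs ih =>
    by_cases h : pvJeMarker r = true
    · simp [pvStepA_eq, h, pvFoldA_true]
    · simp [pvStepA_eq, h, ih]

-- ---- bridges between Str and Chars level ----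
theorem marker_bridge (r : String) : pvJeMarker r = pvMarkerC r.toList := by
  simp [pvJeMarker, pvMarkerC, PySem.Str.startswith, PySem.Str.strip]

theorem map_takeWhile_marker (ls : List String) :
    List.map String.toList (ls.takeWhile (fun r => !pvJeMarker r)) =
      (List.map String.toList ls).takeWhile (fun l => !pvMarkerC l) := by
  have hp : (fun r => !pvJeMarker r) = (fun r : String => !pvMarkerC r.toList) := by
    funext r; rw [marker_bridge]
  rw [hp]
  induction ls with
  | nil => rfl
  | cons r rs ih =>
    by_cases h : pvMarkerC r.toList = true
    · simp [List.takeWhile, h]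
    · simp only [Bool.not_eq_true] at h
      simp [List.takeWhile, h, ih]

theorem rstrip_append_nl (x : List Char) :
    PySem.Chars.rstrip (x ++ ['\n']) = PySem.Chars.rstrip x := by
  have h : PySem.Chars.isspace '\n' = true := by decide
  simp [PySem.Chars.rstrip, h]

-- ---- splitlines.go: reduction lemmas and pulling out the accumulator ----
theorem go_nil (cur : List Char) (acc : List (List Char)) :
    PySem.Chars.splitlines.go pvIsB [] cur acc =
      if cur.isEmpty then acc.reverse else (cur.reverse :: acc).reverse := rfl

theorem go_crlf (rest cur : List Char) (acc : List (List Char)) :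
    PySem.Chars.splitlines.go pvIsB ('\r'::'\n'::rest) cur acc =
      PySem.Chars.splitlines.go pvIsB rest [] (cur.reverse :: acc) := rfl

theorem go_cons (c : Char) (rest cur : List Char) (acc : List (List Char))
    (h : ∀ r', ¬(c = '\r' ∧ rest = '\n'::r')) :
    PySem.Chars.splitlines.go pvIsB (c::rest) cur acc =
      if pvIsB c then PySem.Chars.splitlines.go pvIsB rest [] (cur.reverse :: acc)
      else PySem.Chars.splitlines.go pvIsB rest (c::cur) acc := by
  rw [PySem.Chars.splitlines.go.eq_def]
  split
  · rename_i heq; exact absurd heq (by simp)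
  · rename_i r' heq
    injection heq with h1 h2
    exact absurd ⟨h1, h2⟩ (h r')
  · rename_i c' r' hno heq
    injection heq with h1 h2
    subst h1; subst h2
    rfl

theorem go_acc (n : Nat) : ∀ (s cur : List Char) (acc : List (List Char)), s.length ≤ n →
    PySem.Chars.splitlines.go pvIsB s cur acc =
      acc.reverse ++ PySem.Chars.splitlines.go pvIsB s cur [] := by
  induction n with
  | zero =>
    intro s cur acc h
    have hs : s = [] := by cases s <;> simp_all
    subst hs
    rw [go_nil, go_nil]
    split <;> simp
  | succ n ih =>
    intro s cur acc h
    rcases s with _ | ⟨c, rest⟩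
    · rw [go_nil, go_nil]; split <;> simp
    · rcases rest with _ | ⟨c2, r2⟩
      · have hg : ∀ r', ¬(c = '\r' ∧ ([] : List Char) = '\n'::r') := by simp
        rw [go_cons c [] cur acc hg, go_cons c [] cur [] hg]
        by_cases hb : pvIsB c = true
        · simp only [hb, if_true]
          simp only [go_nil]
          cases cur <;> simp
        · simp only [hb]
          simp only [go_nil]
          cases cur <;> simp
      · by_cases hcr : c = '\r' ∧ c2 = '\n'
        · obtain ⟨h1, h2⟩ := hcr; subst h1; subst h2
          rw [go_crlf, go_crlf]
          have hl : r2.length ≤ n := by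
            simp only [List.length_cons] at h; omega
          rw [ih r2 [] (cur.reverse :: acc) hl, ih r2 [] [cur.reverse] hl]
          simp
        · have hg : ∀ r', ¬(c = '\r' ∧ c2::r2 = '\n'::r') := by
            intro r' ⟨ha, hb⟩
            injection hb with hb1 hb2
            exact hcr ⟨ha, hb1⟩
          rw [go_cons c (c2::r2) cur acc hg, go_cons c (c2::r2) cur [] hg]
          have hl : (c2::r2).length ≤ n := by
            simp only [List.length_cons] at h ⊢; omega
          by_cases hb : pvIsB c = true
          · simp only [hb, if_true]
            rw [ih (c2::r2) [] (cur.reverse :: acc) hl, ih (c2::r2) [] [cur.reverse] hl]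
            simp
          · simp only [hb]
            exact ih (c2::r2) (c::cur) acc hl

theorem go_acc' (s cur : List Char) (acc : List (List Char)) :
    PySem.Chars.splitlines.go pvIsB s cur acc =
      acc.reverse ++ PySem.Chars.splitlines.go pvIsB s cur [] :=
  go_acc s.length s cur acc le_rfl

-- joins
theorem join_nil : PySem.Chars.join ['\n'] [] = [] := by
  simp [PySem.Chars.join, List.intercalate]

theorem join_singleton (a : List Char) : PySem.Chars.join ['\n'] [a] = a := by
  simp [PySem.Chars.join, List.intercalate]

theorem join_cons (a : List Char) (ls : List (List Char)) (h : ls ≠ []) :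
    PySem.Chars.join ['\n'] (a :: ls) = a ++ ['\n'] ++ PySem.Chars.join ['\n'] ls := by
  rcases ls with _ | ⟨b, ls⟩
  · simp_all
  · simp [PySem.Chars.join, List.intercalate, List.intersperse]

-- pvJ of a cons whose head is kept
theorem pvJ_cons_keep (a : List Char) (ls : List (List Char)) (h : pvMarkerC a = false) :
    pvJ (a :: ls) =
      if pvKept ls = [] then a else a ++ ['\n'] ++ pvJ ls := by
  have hk1 : pvKept (a :: ls) = a :: pvKept ls := by
    simp [pvKept, List.takeWhile, h]
  by_cases hk : pvKept ls = []
  · rw [if_pos hk, pvJ, hk1, hk, join_singleton]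
  · rw [if_neg hk, pvJ, hk1, join_cons a _ hk, pvJ]

theorem pvJ_cons_marker (a : List Char) (ls : List (List Char)) (h : pvMarkerC a = true) :
    pvJ (a :: ls) = [] := by
  simp [pvJ, pvKept, List.takeWhile, h]

-- ---- the crux: the character machine computes the joined kept prefix (up to one trailing '\n') ----
theorem pvGo_nil (line out : List Char) :
    pvGo [] line out = if pvMarkerC line then out else out ++ line := rfl

theorem pvGo_crlf (rest line out : List Char) :
    pvGo ('\r'::'\n'::rest) line out =
      if pvMarkerC line then out else pvGo rest [] (out ++ line ++ ['\n']) := rfl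

theorem pvGo_cons (c : Char) (rest line out : List Char)
    (h : ∀ r', ¬(c = '\r' ∧ rest = '\n'::r')) :
    pvGo (c::rest) line out =
      if c = '\r' ∨ c = '\n' then
        if pvMarkerC line then out else pvGo rest [] (out ++ line ++ ['\n'])
      else pvGo rest (line ++ [c]) out := by
  rw [pvGo.eq_def]
  split
  · rename_i heq; exact absurd heq (by simp)
  · rename_i r' heq
    injection heq with h1 h2
    exact absurd ⟨h1, h2⟩ (h r')
  · rename_i c' r' hno heq
    injection heq with h1 h2
    subst h1; subst h2
    rfl

theorem pvGo_spec (s line out : List Char)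
    (hdom : ∀ c ∈ s, pvDomChar c = true) :
    pvGo s line out = out ++ pvJ (PySem.Chars.splitlines.go pvIsB s line.reverse []) ∨
    (pvGo s line out = out ++ pvJ (PySem.Chars.splitlines.go pvIsB s line.reverse []) ++ ['\n'] ∧
      pvKept (PySem.Chars.splitlines.go pvIsB s line.reverse []) ≠ []) := by
  revert hdom
  induction s, line, out using pvGo.induct with
  | case1 line out hm =>
    intro _
    left
    rcases line with _ | ⟨a, l⟩
    · rw [pvGo_nil, go_nil]; simp [hm, pvJ, pvKept]
    · rw [pvGo_nil, go_nil]; simp [hm, pvJ_cons_marker _ _ hm]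
  | case2 line out hm =>
    intro _
    have hm' : pvMarkerC line = false := by rwa [Bool.not_eq_true] at hm
    left
    rcases line with _ | ⟨a, l⟩
    · rw [pvGo_nil, go_nil]; simp [hm', pvJ, pvKept]
    · rw [pvGo_nil, go_nil]
      have hm'' : pvMarkerC (a :: l) = false := hm'
      simp [hm'', pvJ_cons_keep (a::l) [] hm'', pvKept]
  | case3 line out rest hm =>
    intro _
    left
    have hL : PySem.Chars.splitlines.go pvIsB ('\r'::'\n'::rest) line.reverse [] =
        line :: PySem.Chars.splitlines.go pvIsB rest [] [] := by
      rw [go_crlf, go_acc']; simp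
    rw [pvGo_crlf, if_pos hm, hL, pvJ_cons_marker _ _ hm]
    simp
  | case4 line out rest hm ih =>
    intro hdom
    have hm' : pvMarkerC line = false := by rwa [Bool.not_eq_true] at hm
    have hdr : ∀ c ∈ rest, pvDomChar c = true := fun c hc =>
      hdom c (List.mem_cons_of_mem _ (List.mem_cons_of_mem _ hc))
    have ihd := ih hdr
    have hL : PySem.Chars.splitlines.go pvIsB ('\r'::'\n'::rest) line.reverse [] =
        line :: PySem.Chars.splitlines.go pvIsB rest [] [] := by
      rw [go_crlf, go_acc']; simp
    rw [pvGo_crlf, if_neg hm, hL]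
    set L' := PySem.Chars.splitlines.go pvIsB rest [] [] with hL'
    have hkept : pvKept (line :: L') = line :: pvKept L' := by
      simp [pvKept, List.takeWhile, hm']
    simp only [List.reverse_nil] at ihd
    by_cases hk : pvKept L' = []
    · rcases ihd with hcl | ⟨hcr, hne⟩
      · right
        refine ⟨?_, by simp [hkept]⟩
        have hJ : pvJ L' = [] := by rw [pvJ, hk]; exact join_nil
        rw [hcl, hJ, pvJ_cons_keep line L' hm', if_pos hk]
        simp
      · exact (hne hk).elim
    · rcases ihd with hcl | ⟨hcr, hne⟩
      · left
        rw [hcl, pvJ_cons_keep line L' hm', if_neg hk]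
        simp [hL']
      · right
        refine ⟨?_, by simp [hkept]⟩
        rw [hcr, pvJ_cons_keep line L' hm', if_neg hk]
        simp [hL']
  | case5 line out c rest hno hor hm =>
    intro _
    left
    have hg := pvGo_cons c rest line out (fun r' h => hno r' h.1 h.2)
    have hb : pvIsB c = true := by rcases hor with h | h <;> subst h <;> decide
    have hL : PySem.Chars.splitlines.go pvIsB (c::rest) line.reverse [] =
        line :: PySem.Chars.splitlines.go pvIsB rest [] [] := by
      rw [go_cons c rest _ _ (fun r' h => hno r' h.1 h.2), if_pos hb, go_acc']
      simp
    rw [hg, if_pos hor, if_pos hm, hL, pvJ_cons_marker _ _ hm]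
    simp
  | case6 line out c rest hno hor hm ih =>
    intro hdom
    have hm' : pvMarkerC line = false := by rwa [Bool.not_eq_true] at hm
    have hdr : ∀ c' ∈ rest, pvDomChar c' = true := fun c' hc =>
      hdom c' (List.mem_cons_of_mem _ hc)
    have ihd := ih hdr
    have hg := pvGo_cons c rest line out (fun r' h => hno r' h.1 h.2)
    have hb : pvIsB c = true := by rcases hor with h | h <;> subst h <;> decide
    have hL : PySem.Chars.splitlines.go pvIsB (c::rest) line.reverse [] =
        line :: PySem.Chars.splitlines.go pvIsB rest [] [] := by
      rw [go_cons c rest _ _ (fun r' h => hno r' h.1 h.2), if_pos hb, go_acc']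
      simp
    rw [hg, if_pos hor, if_neg hm, hL]
    set L' := PySem.Chars.splitlines.go pvIsB rest [] [] with hL'
    have hkept : pvKept (line :: L') = line :: pvKept L' := by
      simp [pvKept, List.takeWhile, hm']
    simp only [List.reverse_nil] at ihd
    by_cases hk : pvKept L' = []
    · rcases ihd with hcl | ⟨hcr, hne⟩
      · right
        refine ⟨?_, by simp [hkept]⟩
        have hJ : pvJ L' = [] := by rw [pvJ, hk]; exact join_nil
        rw [hcl, hJ, pvJ_cons_keep line L' hm', if_pos hk]
        simp
      · exact (hne hk).elim
    · rcases ihd with hcl | ⟨hcr, hne⟩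
      · left
        rw [hcl, pvJ_cons_keep line L' hm', if_neg hk]
        simp [hL']
      · right
        refine ⟨?_, by simp [hkept]⟩
        rw [hcr, pvJ_cons_keep line L' hm', if_neg hk]
        simp [hL']
  | case7 line out c rest hno hor ih =>
    intro hdom
    have hdc : pvDomChar c = true := hdom c (List.mem_cons_self)
    have hdr : ∀ c' ∈ rest, pvDomChar c' = true := fun c' hc =>
      hdom c' (List.mem_cons_of_mem _ hc)
    have hb : pvIsB c = false := dom_isB_false c hdc hor
    have hg := pvGo_cons c rest line out (fun r' h => hno r' h.1 h.2)
    have hL : PySem.Chars.splitlines.go pvIsB (c::rest) line.reverse [] =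
        PySem.Chars.splitlines.go pvIsB rest (line ++ [c]).reverse [] := by
      rw [go_cons c rest _ _ (fun r' h => hno r' h.1 h.2)]
      simp [hb]
    rw [hg, if_neg hor, hL]
    exact ih hdr

-- ===== VERDICT (by name: the statement is the Claim_ definition above) =====
theorem odstran_ulohy_z_kodu_spec : Claim_equal_odstran_ulohy_z_kodu := by
  intro kod hdom
  show odstran_ulohy_z_kodu kod = odstran_ulohy_z_kodu_alt kod
  have hd : ∀ c ∈ kod.toList, pvDomChar c = true := by
    have h := hdom
    unfold Dom_odstran_ulohy_z_kodu pvDomStr at h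
    simpa [List.all_eq_true] using h
  show PySem.Str.rstrip (PySem.Str.join "\n"
      (((PySem.Str.splitlines kod).foldl pvStepA ([], false)).1)) =
    PySem.Str.rstrip (String.ofList (pvGo kod.toList [] []))
  rw [pvFoldA_false]
  simp only [List.nil_append]
  have hX : (PySem.Str.join "\n"
      ((PySem.Str.splitlines kod).takeWhile (fun r => !pvJeMarker r))).toList
      = pvJ (PySem.Chars.splitlines.go pvIsB kod.toList [] []) := by
    simp only [PySem.Str.join]
    rw [map_takeWhile_marker]
    simp [pvJ, pvKept, ← splitlines_eq]
  have hcrux := pvGo_spec kod.toList [] [] hd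
  simp only [List.reverse_nil, List.nil_append] at hcrux
  rcases hcrux with hc | ⟨hc, _⟩
  · simp only [PySem.Str.rstrip, hX, hc]
    simp
  · simp only [PySem.Str.rstrip, hX, hc]
    simp [rstrip_append_nl]
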